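-- pv_equiv track=rewrite | github.com/AvacynLab/searchone | backend/app/services/ingest.py | segment_text_sections
-- ===== SOURCE A (Python) =====
-- from typing import List, Dict, Any
--
-- def segment_text_sections(text: str) -> List[Dict[str, Any]]:
--     """Naive section segmentation using headings/paragraph breaks."""
--     sections = []
--     lines = text.splitlines()
--     buf = []
--     title = "section_1"
--     idx = 1
--     for line in lines:
--         stripped = line.strip()
--         if not stripped:
--             continue
--         if stripped.startswith("#") or stripped[:2].isdigit():
--             if buf:
--                 sections.append({"title": title, "text": "\n".join(buf).strip()})
--                 buf = []
--             title = stripped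
--             idx += 1
--         else:
--             buf.append(stripped)
--     if buf:
--         sections.append({"title": title, "text": "\n".join(buf).strip()})
--     return sections
-- ===== SOURCE B (Python) =====
-- from typing import List, Dict, Any
--
-- def segment_text_sections(text: str) -> List[Dict[str, Any]]:
--     """Section segmentation: filter to stripped non-empty lines, then split at headings recursively."""
--     lines = [s for s in (l.strip() for l in text.splitlines()) if s]
--
--     def is_head(s: str) -> bool:
--         return s.startswith("#") or s[:2].isdigit()
--
--     def build(title: str, rest: List[str]) -> List[Dict[str, Any]]:
--         i = 0
--         while i < len(rest) and not is_head(rest[i]):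
--             i += 1
--         content = rest[:i]
--         out = [{"title": title, "text": "\n".join(content).strip()}] if content else []
--         if i < len(rest):
--             out.extend(build(rest[i], rest[i + 1:]))
--         return out
--
--     return build("section_1", lines)
-- ===== Notes on version B (the rewrite author's own statement) =====
-- stated objective: alternative
-- what changed: Replaced A's single accumulator loop (running buffer, pending title, flush-on-heading plus a final flush) by a two-phase decomposition: first normalise to the stripped non-empty lines, then recursively split that list at heading positions, emitting each section from its slice.
import Mathlib
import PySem

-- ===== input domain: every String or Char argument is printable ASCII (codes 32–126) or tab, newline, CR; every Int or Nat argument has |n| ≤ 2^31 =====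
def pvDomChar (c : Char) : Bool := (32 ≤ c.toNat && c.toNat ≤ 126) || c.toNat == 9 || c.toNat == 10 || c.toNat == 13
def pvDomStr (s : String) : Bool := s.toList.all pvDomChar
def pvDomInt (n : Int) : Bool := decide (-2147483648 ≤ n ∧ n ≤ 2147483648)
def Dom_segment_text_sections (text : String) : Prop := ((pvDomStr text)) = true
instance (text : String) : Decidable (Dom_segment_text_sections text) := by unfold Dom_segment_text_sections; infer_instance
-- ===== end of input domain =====

-- B restructures A's flush-on-heading accumulator loop into: normalise to stripped non-empty lines, then recursively split at headings (alternative decomposition, same cost).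

-- ===== PORT A =====
-- one loop iteration of A: state = (sections, buf, title, idx)
def pvStepA (st : List (List (String × String)) × List String × String × Int) (line : String) :
    List (List (String × String)) × List String × String × Int :=
  let stripped := PySem.Str.strip line
  if stripped = "" then st
  else if PySem.Str.startswith stripped "#" || PySem.Str.strIsdigit (PySem.Str.slice stripped none (some 2)) then
    (st.1 ++ (if st.2.1 ≠ [] then [[("title", st.2.2.1), ("text", PySem.Str.strip (PySem.Str.join "\n" st.2.1))]] else []),
     [], stripped, st.2.2.2 + 1)
  else (st.1, st.2.1 ++ [stripped], st.2.2.1, st.2.2.2)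

def segment_text_sections (text : String) : List (List (String × String)) :=
  let lines := PySem.Str.splitlines text
  let st := lines.foldl pvStepA ([], [], "section_1", (1 : Int))
  if st.2.1 ≠ [] then
    st.1 ++ [[("title", st.2.2.1), ("text", PySem.Str.strip (PySem.Str.join "\n" st.2.1))]]
  else st.1

-- ===== PORT B =====
def pvIsHead (s : String) : Bool :=
  PySem.Str.startswith s "#" || PySem.Str.strIsdigit (PySem.Str.slice s none (some 2))

def pvMkSec (title : String) (content : List String) : List (String × String) :=
  [("title", title), ("text", PySem.Str.strip (PySem.Str.join "\n" content))]

def pvBuild (title : String) (rest : List String) : List (List (String × String)) :=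
  match h : rest.dropWhile (fun s => !pvIsHead s) with
  | [] =>
      if rest.takeWhile (fun s => !pvIsHead s) ≠ [] then
        [pvMkSec title (rest.takeWhile (fun s => !pvIsHead s))]
      else []
  | hd :: tl =>
      (if rest.takeWhile (fun s => !pvIsHead s) ≠ [] then
        [pvMkSec title (rest.takeWhile (fun s => !pvIsHead s))]
      else []) ++ pvBuild hd tl
termination_by rest.length
decreasing_by
  have hle := List.length_dropWhile_le (p := fun s => !pvIsHead s) (l := rest)
  rw [h] at hle
  simp at hle
  omega

def segment_text_sections_alt (text : String) : List (List (String × String)) :=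
  let lines := ((PySem.Str.splitlines text).map PySem.Str.strip).filter (fun s => s ≠ "")
  pvBuild "section_1" lines

-- ===== PRECONDITION & SPEC =====
def Spec_segment_text_sections (text : String) (out : List (List (String × String))) : Prop := out = segment_text_sections_alt text
instance (text : String) (out : List (List (String × String))) : Decidable (Spec_segment_text_sections text out) := by unfold Spec_segment_text_sections; infer_instance

-- ===== CLAIM (what is proved, stated in full; the proofs are below) =====
def Claim_equal_segment_text_sections : Prop := ∀ (text : String), Dom_segment_text_sections text → Spec_segment_text_sections text (segment_text_sections text)

-- ===== LEMMAS AND PROOFS =====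

-- simplified step over already-cleaned lines: state = (sections, buf, title)
def pvStep' (st : List (List (String × String)) × List String × String) (s : String) :
    List (List (String × String)) × List String × String :=
  if pvIsHead s then
    (st.1 ++ (if st.2.1 ≠ [] then [pvMkSec st.2.2 st.2.1] else []), [], s)
  else (st.1, st.2.1 ++ [s], st.2.2)

def pvFinish (st : List (List (String × String)) × List String × String) : List (List (String × String)) :=
  if st.2.1 ≠ [] then st.1 ++ [pvMkSec st.2.2 st.2.1] else st.1

theorem pvBuild_eq (title : String) (rest : List String) : pvBuild title rest =
    (if rest.takeWhile (fun s => !pvIsHead s) ≠ [] then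
       [pvMkSec title (rest.takeWhile (fun s => !pvIsHead s))] else []) ++
    (match rest.dropWhile (fun s => !pvIsHead s) with
     | [] => []
     | hd :: tl => pvBuild hd tl) := by
  rw [pvBuild]
  split <;> rename_i heq <;> rw [heq] <;> simp

theorem pvTakeWhile_all_append {α : Type} (p : α → Bool) (buf l : List α)
    (h : ∀ x ∈ buf, p x = true) : (buf ++ l).takeWhile p = buf ++ l.takeWhile p := by
  induction buf with
  | nil => simp
  | cons b bs ih =>
      simp [h b (by simp), ih (fun x hx => h x (by simp [hx]))]

theorem pvDropWhile_all_append {α : Type} (p : α → Bool) (buf l : List α)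
    (h : ∀ x ∈ buf, p x = true) : (buf ++ l).dropWhile p = l.dropWhile p := by
  induction buf with
  | nil => simp
  | cons b bs ih =>
      simp only [List.cons_append, List.dropWhile_cons, h b (by simp)]
      exact ih (fun x hx => h x (by simp [hx]))

theorem pvFoldA_eq_fold' (lines : List String) :
    ∀ (acc : List (List (String × String))) (buf : List String) (title : String) (idx : Int),
    (let st := lines.foldl pvStepA (acc, buf, title, idx)
     (st.1, st.2.1, st.2.2.1)) =
    ((lines.map PySem.Str.strip).filter (fun s => s ≠ "")).foldl pvStep' (acc, buf, title) := by
  induction lines with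
  | nil => intro acc buf title idx; rfl
  | cons l ls ih =>
      intro acc buf title idx
      simp only [List.foldl_cons, List.map_cons, List.filter_cons]
      by_cases he : PySem.Str.strip l = ""
      · have hA : pvStepA (acc, buf, title, idx) l = (acc, buf, title, idx) := by
          simp [pvStepA, he]
        rw [hA, if_neg (by simp [he])]
        exact ih acc buf title idx
      · rw [if_pos (by simp [he]), List.foldl_cons]
        by_cases hh : pvIsHead (PySem.Str.strip l) = true
        · have hA : pvStepA (acc, buf, title, idx) l =
              (acc ++ (if buf ≠ [] then [pvMkSec title buf] else []), [], PySem.Str.strip l, idx + 1) := by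
            simp [pvStepA, pvIsHead] at hh ⊢
            rw [if_neg he, if_pos hh]
            rfl
          have hB : pvStep' (acc, buf, title) (PySem.Str.strip l) =
              (acc ++ (if buf ≠ [] then [pvMkSec title buf] else []), [], PySem.Str.strip l) := by
            simp [pvStep', hh]
          rw [hA, hB]
          exact ih _ _ _ _
        · have hA : pvStepA (acc, buf, title, idx) l = (acc, buf ++ [PySem.Str.strip l], title, idx) := by
            simp [pvIsHead] at hh
            simp [pvStepA, he, hh]
          have hB : pvStep' (acc, buf, title) (PySem.Str.strip l) =
              (acc, buf ++ [PySem.Str.strip l], title) := by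
            simp [pvStep', hh]
          rw [hA, hB]
          exact ih _ _ _ _

theorem pvFold'_eq_build (rest : List String) :
    ∀ (acc : List (List (String × String))) (buf : List String) (title : String),
    (∀ s ∈ buf, pvIsHead s = false) →
    pvFinish (rest.foldl pvStep' (acc, buf, title)) = acc ++ pvBuild title (buf ++ rest) := by
  induction rest with
  | nil =>
      intro acc buf title hbuf
      have hp : ∀ x ∈ buf, (fun s => !pvIsHead s) x = true := by
        intro x hx; simp [hbuf x hx]
      rw [pvBuild_eq]
      rw [List.append_nil] at *
      have ht : buf.takeWhile (fun s => !pvIsHead s) = buf := List.takeWhile_eq_self_iff.mpr hp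
      have hd : buf.dropWhile (fun s => !pvIsHead s) = [] := List.dropWhile_eq_nil_iff.mpr hp
      rw [ht, hd]
      simp only [List.foldl_nil, pvFinish]
      split <;> simp
  | cons s rest ih =>
      intro acc buf title hbuf
      have hp : ∀ x ∈ buf, (fun s => !pvIsHead s) x = true := by
        intro x hx; simp [hbuf x hx]
      simp only [List.foldl_cons]
      by_cases hh : pvIsHead s = true
      · have hB : pvStep' (acc, buf, title) s =
            (acc ++ (if buf ≠ [] then [pvMkSec title buf] else []), [], s) := by
          simp [pvStep', hh]
        rw [hB, ih _ [] s (by simp)]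
        rw [pvBuild_eq title (buf ++ s :: rest)]
        rw [pvTakeWhile_all_append _ _ _ hp, pvDropWhile_all_append _ _ _ hp]
        simp only [List.takeWhile_cons, hh, Bool.not_true, List.dropWhile_cons, List.nil_append,
          List.append_assoc]
        congr 1
        by_cases hb : buf = [] <;> simp [hb]
      · have hB : pvStep' (acc, buf, title) s = (acc, buf ++ [s], title) := by
          simp [pvStep', hh]
        rw [hB, ih _ (buf ++ [s]) title ?hyp]
        · rw [List.append_assoc]; rfl
        · intro x hx
          rcases List.mem_append.mp hx with h1 | h1
          · exact hbuf x h1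
          · simp at h1; subst h1; simpa using hh

-- ===== VERDICT (by name: the statement is the Claim_ definition above) =====
theorem segment_text_sections_spec : Claim_equal_segment_text_sections := by
  intro text _
  unfold Spec_segment_text_sections segment_text_sections segment_text_sections_alt
  have h1 := pvFoldA_eq_fold' (PySem.Str.splitlines text) [] [] "section_1" 1
  have h2 := pvFold'_eq_build (((PySem.Str.splitlines text).map PySem.Str.strip).filter (fun s => s ≠ ""))
      [] [] "section_1" (by simp)
  simp only [List.nil_append] at h2
  set st := (PySem.Str.splitlines text).foldl pvStepA ([], [], "section_1", (1 : Int)) with hst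
  have : pvFinish (st.1, st.2.1, st.2.2.1) = pvBuild "section_1"
      (((PySem.Str.splitlines text).map PySem.Str.strip).filter (fun s => s ≠ "")) := by
    rw [show (st.1, st.2.1, st.2.2.1) =
        (((PySem.Str.splitlines text).map PySem.Str.strip).filter (fun s => s ≠ "")).foldl pvStep'
          ([], [], "section_1") from h1]
    exact h2
  simpa [pvFinish, pvMkSec] using this
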